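-- pv_equiv track=rewrite | github.com/xqitong/bubblesort_vi | bubblesort_vi.py | setcolor
-- ===== SOURCE A (Python) =====
-- def setcolor(i_idx,m_idx,lst):
--     res=[]
--     for i, ele in enumerate(lst):
--         lev = '#95a5a6'#设置颜色
--         if i == i_idx:
--             lev = '#e74c3c' #当前对象
--         elif i == m_idx:
--             lev = '#2ecc71' #比较对象
--         res.append((ele,lev))
--     return res
-- ===== SOURCE B (Python) =====
-- def setcolor(i_idx, m_idx, lst):
--     res = [(ele, '#95a5a6') for ele in lst]
--     if 0 <= m_idx < len(lst):
--         res[m_idx] = (lst[m_idx], '#2ecc71')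
--     if 0 <= i_idx < len(lst):
--         res[i_idx] = (lst[i_idx], '#e74c3c')
--     return res
-- ===== Notes on version B (the rewrite author's own statement) =====
-- stated objective: simpler
-- what changed: Instead of choosing a color per element inside the loop, B tags every element with the default color in one comprehension and then overwrites the two special positions by direct bounds-checked indexing (m_idx first so i_idx wins ties).
import Mathlib
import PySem

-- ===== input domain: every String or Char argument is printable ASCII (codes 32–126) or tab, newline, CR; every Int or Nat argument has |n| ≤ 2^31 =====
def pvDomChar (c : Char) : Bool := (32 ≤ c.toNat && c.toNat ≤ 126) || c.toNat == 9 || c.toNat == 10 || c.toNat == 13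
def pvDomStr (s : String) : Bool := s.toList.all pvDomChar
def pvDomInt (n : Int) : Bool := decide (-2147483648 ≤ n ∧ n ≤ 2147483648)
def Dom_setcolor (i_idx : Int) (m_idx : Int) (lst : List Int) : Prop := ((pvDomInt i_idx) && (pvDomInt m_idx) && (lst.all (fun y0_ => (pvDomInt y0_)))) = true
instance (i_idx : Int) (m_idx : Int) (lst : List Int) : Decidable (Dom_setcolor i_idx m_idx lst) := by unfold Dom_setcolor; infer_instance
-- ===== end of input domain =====

-- B builds the all-default-color list first and then patches the two special
-- positions by bounds-checked direct indexing (m_idx before i_idx so the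
-- i_idx color wins ties), instead of choosing the color inside the loop.

-- ===== PORT A =====
-- literal port: res = []; for i, ele in enumerate(lst): pick lev; res.append((ele, lev))
def setcolor (i_idx : Int) (m_idx : Int) (lst : List Int) : List (Int × String) :=
  (PySem.List.enumerate lst).foldl
    (fun res p =>
      res ++ [(p.2,
        if p.1 = i_idx then "#e74c3c"
        else if p.1 = m_idx then "#2ecc71"
        else "#95a5a6")]) []

-- ===== PORT B =====
def setcolor_alt (i_idx : Int) (m_idx : Int) (lst : List Int) : List (Int × String) :=
  let res0 := lst.map (fun ele => (ele, "#95a5a6"))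
  let res1 := if 0 ≤ m_idx ∧ m_idx < (lst.length : Int)
              then res0.set m_idx.toNat (lst[m_idx.toNat]!, "#2ecc71") else res0
  if 0 ≤ i_idx ∧ i_idx < (lst.length : Int)
  then res1.set i_idx.toNat (lst[i_idx.toNat]!, "#e74c3c") else res1

-- ===== PRECONDITION & SPEC =====
def Spec_setcolor (i_idx : Int) (m_idx : Int) (lst : List Int) (out : List (Int × String)) : Prop := out = setcolor_alt i_idx m_idx lst
instance (i_idx : Int) (m_idx : Int) (lst : List Int) (out : List (Int × String)) : Decidable (Spec_setcolor i_idx m_idx lst out) := by unfold Spec_setcolor; infer_instance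

-- ===== CLAIM (what is proved, stated in full; the proofs are below) =====
def Claim_equal_setcolor : Prop := ∀ (i_idx : Int) (m_idx : Int) (lst : List Int), Dom_setcolor i_idx m_idx lst → Spec_setcolor i_idx m_idx lst (setcolor i_idx m_idx lst)

-- ===== LEMMAS AND PROOFS =====

theorem setcolor_eq_map (i_idx m_idx : Int) (lst : List Int) :
    setcolor i_idx m_idx lst =
      (PySem.List.enumerate lst).map
        (fun p => (p.2,
          if p.1 = i_idx then "#e74c3c"
          else if p.1 = m_idx then "#2ecc71"
          else "#95a5a6")) := by
  unfold setcolor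
  rw [PySem.List.foldl_append_singleton_eq_map]
  simp

theorem setcolor_alt_length (i_idx m_idx : Int) (lst : List Int) :
    (setcolor_alt i_idx m_idx lst).length = lst.length := by
  unfold setcolor_alt
  split <;> split <;> simp

theorem setcolor_alt_getElem (i_idx m_idx : Int) (lst : List Int) (j : Nat)
    (hj : j < lst.length) (hj' : j < (setcolor_alt i_idx m_idx lst).length) :
    (setcolor_alt i_idx m_idx lst)[j]'hj' =
      (lst[j],
        if (j : Int) = i_idx then "#e74c3c"
        else if (j : Int) = m_idx then "#2ecc71"
        else "#95a5a6") := by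
  unfold setcolor_alt
  by_cases hji : (j : Int) = i_idx
  · have hir : 0 ≤ i_idx ∧ i_idx < (lst.length : Int) := by omega
    have ht : i_idx.toNat = j := by omega
    simp [hir, hji, ht, List.getElem_set, List.getElem!_eq_getElem?_getD,
      List.getElem?_eq_getElem hj]
  · by_cases hjm : (j : Int) = m_idx
    · have hmr : 0 ≤ m_idx ∧ m_idx < (lst.length : Int) := by omega
      have ht : m_idx.toNat = j := by omega
      split_ifs
      all_goals try omega
      all_goals
        first
          | (have hne : ¬ i_idx.toNat = j := by omega
             simp [ht, hne, hji, hjm, List.getElem_set,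
               List.getElem!_eq_getElem?_getD, List.getElem?_eq_getElem hj])
          | simp [ht, hji, hjm, List.getElem_set,
              List.getElem!_eq_getElem?_getD, List.getElem?_eq_getElem hj]
    · have hne1 : ∀ h : 0 ≤ i_idx ∧ i_idx < (lst.length : Int), ¬ i_idx.toNat = j := by
        intro h; omega
      have hne2 : ∀ h : 0 ≤ m_idx ∧ m_idx < (lst.length : Int), ¬ m_idx.toNat = j := by
        intro h; omega
      split_ifs with h1 h2 h2 <;>
        simp [hji, hjm, List.getElem_set, *]

-- ===== VERDICT (by name: the statement is the Claim_ definition above) =====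
theorem setcolor_spec : Claim_equal_setcolor := by
  intro i_idx m_idx lst _
  unfold Spec_setcolor
  rw [setcolor_eq_map]
  apply List.ext_getElem
  · simp [setcolor_alt_length, PySem.List.length_enumerate]
  · intro j hj hj'
    have hjlen : j < lst.length := by
      simpa [setcolor_alt_length] using hj'
    rw [List.getElem_map, PySem.List.getElem_enumerate,
      setcolor_alt_getElem i_idx m_idx lst j hjlen hj']
    simp
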